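-- pv_equiv track=rewrite | github.com/FlpMomchev/NLP | ingest/cleaner.py | final_cleanup
-- ===== SOURCE A (Python) =====
-- def final_cleanup(text: str) -> str:
--     """
--     Perform final text validation and cleanup operations.
--
--     Removes empty lines, normalizes paragraph breaks, and ensures
--     consistent text structure for downstream processing. Validates
--     that essential content is preserved while removing formatting artifacts.
--
--     Args:
--         text: Document text after primary cleaning operations
--
--     Returns:
--         Final cleaned text ready for workflow extraction processing
--     """
--
--     # Remove empty lines at start and end of paragraphs
--     lines = text.split('\n')
--     cleaned_lines = []
--
--     for line in lines:
--         line = line.strip()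
--         if line:  # Keep non-empty lines
--             cleaned_lines.append(line)
--         elif cleaned_lines and cleaned_lines[-1]:  # Keep single empty line as paragraph break
--             cleaned_lines.append("")
--
--     # Remove trailing empty lines
--     while cleaned_lines and not cleaned_lines[-1]:
--         cleaned_lines.pop()
--
--     text = '\n'.join(cleaned_lines)
--
--     # Final strip
--     return text.strip()
-- ===== SOURCE B (Python) =====
-- def final_cleanup(text: str) -> str:
--     """Group stripped lines into paragraphs and join them with blank lines."""
--     paragraphs = []
--     current = []
--     for raw in text.split('\n'):
--         line = raw.strip()
--         if line:
--             current.append(line)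
--         elif current:
--             paragraphs.append('\n'.join(current))
--             current = []
--     if current:
--         paragraphs.append('\n'.join(current))
--     return '\n\n'.join(paragraphs)
-- ===== Notes on version B (the rewrite author's own statement) =====
-- stated objective: simpler
-- what changed: B groups the stripped lines directly into paragraphs and joins the paragraphs with a blank-line separator, instead of A's accumulator that inserts sentinel empty lines, pops trailing ones in a while-loop and strips the joined result.
import Mathlib
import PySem

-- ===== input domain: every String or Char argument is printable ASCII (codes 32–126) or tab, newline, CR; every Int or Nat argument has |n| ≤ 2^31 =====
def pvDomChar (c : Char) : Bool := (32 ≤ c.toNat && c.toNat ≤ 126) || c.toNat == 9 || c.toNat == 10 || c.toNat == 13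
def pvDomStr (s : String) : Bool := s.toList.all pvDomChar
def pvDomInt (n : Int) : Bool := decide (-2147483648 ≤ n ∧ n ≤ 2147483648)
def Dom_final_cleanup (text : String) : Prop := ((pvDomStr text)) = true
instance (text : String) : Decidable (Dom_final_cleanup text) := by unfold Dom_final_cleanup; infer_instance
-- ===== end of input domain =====

-- B replaces A's blank-line-sentinel accumulator plus trailing-pop plus final strip by
-- grouping stripped lines into paragraphs joined with a blank-line separator (objective: simpler; same cost).

-- ===== PORT A =====
-- the loop body of A: strip the line; keep it if non-empty, else append one "" if the
-- accumulated list is non-empty and its last entry is truthy (cleaned_lines[-1])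
def pvStepA (acc : List (List Char)) (rawLine : List Char) : List (List Char) :=
  let line := PySem.Chars.strip rawLine
  if line ≠ [] then acc ++ [line]
  else
    match acc.getLast? with          -- 'cleaned_lines and cleaned_lines[-1]' (short-circuit)
    | some last => if last ≠ [] then acc ++ [[]] else acc
    | none => acc

-- 'while cleaned_lines and not cleaned_lines[-1]: cleaned_lines.pop()'
def pvPopTrail (xs : List (List Char)) : List (List Char) :=
  if h : xs.getLast? = some [] then pvPopTrail xs.dropLast else xs
termination_by xs.length
decreasing_by
  have hne : xs ≠ [] := by intro e; rw [e] at h; simp at h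
  have : 0 < xs.length := List.length_pos_of_ne_nil hne
  rw [List.length_dropLast]; omega

def final_cleanup (text : String) : String :=
  -- text.split('\n'): the separator is the non-empty literal '\n', so split? = some (splitOn …);
  -- fold = the for-loop, pvPopTrail = the trailing while-pop, then '\n'.join(...).strip()
  String.mk (PySem.Chars.strip (PySem.Chars.join ['\n']
    (pvPopTrail ((PySem.Chars.splitOn text.toList ['\n']).foldl pvStepA []))))

-- ===== PORT B =====
-- the loop body of B over the state (paragraphs, current): strip the line; non-empty lines
-- extend the current paragraph, an empty line closes a non-empty current paragraph
def pvStepB (st : List (List Char) × List (List Char)) (rawLine : List Char) :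
    List (List Char) × List (List Char) :=
  let line := PySem.Chars.strip rawLine
  if line ≠ [] then (st.1, st.2 ++ [line])
  else if st.2 ≠ [] then (st.1 ++ [PySem.Chars.join ['\n'] st.2], [])
  else st

def final_cleanup_alt (text : String) : String :=
  -- the for-loop over the split lines, the trailing 'if current: …', then '\n\n'.join(paragraphs)
  String.mk (PySem.Chars.join ['\n', '\n']
    ((fun st => if st.2 ≠ [] then st.1 ++ [PySem.Chars.join ['\n'] st.2] else st.1)
      ((PySem.Chars.splitOn text.toList ['\n']).foldl pvStepB ([], []))))

-- ===== PRECONDITION & SPEC =====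
def Spec_final_cleanup (text : String) (out : String) : Prop := out = final_cleanup_alt text
instance (text : String) (out : String) : Decidable (Spec_final_cleanup text out) := by unfold Spec_final_cleanup; infer_instance

-- ===== CLAIM (what is proved, stated in full; the proofs are below) =====
def Claim_equal_final_cleanup : Prop := ∀ (text : String), Dom_final_cleanup text → Spec_final_cleanup text (final_cleanup text)

-- ===== LEMMAS AND PROOFS =====

-- a "clean line": non-empty, and neither end is Python whitespace (what line.strip() produces)
def pvCleanLine (l : List Char) : Prop :=
  l ≠ [] ∧ (∀ c ∈ l.head?, PySem.Chars.isspace c = false) ∧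
    (∀ c ∈ l.getLast?, PySem.Chars.isspace c = false)

-- A's accumulator as determined by B's state: the closed paragraph groups, each followed
-- by one sentinel empty line, then the open current paragraph
def pvAcc (pss : List (List (List Char))) (cur : List (List Char)) : List (List Char) :=
  (pss.flatMap (fun g => g ++ [[]])) ++ cur

def pvGood (pss : List (List (List Char))) (cur : List (List Char)) : Prop :=
  (∀ g ∈ pss, g ≠ [] ∧ ∀ l ∈ g, pvCleanLine l) ∧ (∀ l ∈ cur, pvCleanLine l)

lemma pvJoinEq (sep : List Char) (parts : List (List Char)) :
    PySem.Chars.join sep parts = List.intercalate sep parts := rfl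

lemma pvInterSingleton {α : Type} (sep x : List α) : List.intercalate sep [x] = x := by
  simp [List.intercalate, List.intersperse]

lemma pvInterCons {α : Type} (sep x : List α) (rest : List (List α)) (h : rest ≠ []) :
    List.intercalate sep (x :: rest) = x ++ sep ++ List.intercalate sep rest := by
  cases rest with
  | nil => exact absurd rfl h
  | cons b t => simp [List.intercalate, List.intersperse]

lemma pvInterAppend {α : Type} (sep : List α) (xs ys : List (List α)) (hx : xs ≠ []) (hy : ys ≠ []) :
    List.intercalate sep (xs ++ ys)
      = List.intercalate sep xs ++ sep ++ List.intercalate sep ys := by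
  induction xs with
  | nil => exact absurd rfl hx
  | cons a t ih =>
    cases t with
    | nil => rw [List.singleton_append, pvInterCons sep a ys hy, pvInterSingleton]
    | cons b u =>
      rw [List.cons_append, pvInterCons sep a ((b :: u) ++ ys) (by simp),
        ih (by simp), pvInterCons sep a (b :: u) (by simp)]
      simp [List.append_assoc]

lemma pvInterHead? {α : Type} (sep x : List α) (rest : List (List α)) (hx : x ≠ []) :
    (List.intercalate sep (x :: rest)).head? = x.head? := by
  cases rest with
  | nil => rw [pvInterSingleton]
  | cons b t =>
    rw [pvInterCons sep x (b :: t) (by simp), List.append_assoc, List.head?_append,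
      Option.or_of_isSome (by simpa [List.isSome_head?] using hx)]

lemma pvInterLast? {α : Type} (sep x : List α) (init : List (List α)) (hx : x ≠ []) :
    (List.intercalate sep (init ++ [x])).getLast? = x.getLast? := by
  cases init with
  | nil => rw [List.nil_append, pvInterSingleton]
  | cons b t =>
    rw [pvInterAppend sep (b :: t) [x] (by simp) (by simp), pvInterSingleton,
      List.getLast?_append, Option.or_of_isSome (List.getLast?_isSome.mpr hx)]

lemma pvInter_concat (qss : List (List (List Char))) (hq : qss ≠ [])
    (hg : ∀ g ∈ qss, g ≠ []) :
    ∃ g ∈ qss, ∃ l ∈ g, ∃ T, List.intercalate [[]] qss = T ++ [l] := by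
  rcases List.eq_nil_or_concat qss with rfl | ⟨init, gz, rfl⟩
  · exact absurd rfl hq
  · rw [List.concat_eq_append]
    have hgz : gz ≠ [] := hg gz (by simp)
    rcases List.eq_nil_or_concat gz with rfl | ⟨g', lz, rfl⟩
    · exact absurd rfl hgz
    · rw [List.concat_eq_append]
      refine ⟨g' ++ [lz], by simp, lz, by simp, ?_⟩
      cases init with
      | nil => exact ⟨g', by rw [List.nil_append, pvInterSingleton]⟩
      | cons b t =>
        refine ⟨List.intercalate [[]] (b :: t) ++ [[]] ++ g', ?_⟩
        rw [pvInterAppend [[]] (b :: t) [g' ++ [lz]] (by simp) (by simp), pvInterSingleton]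
        simp [List.append_assoc]

lemma pvInter_ne_nil (qss : List (List (List Char))) (hq : qss ≠ [])
    (hg : ∀ g ∈ qss, g ≠ []) : List.intercalate [[]] qss ≠ [] := by
  obtain ⟨g, _, l, _, T, hT⟩ := pvInter_concat qss hq hg
  rw [hT]; simp

lemma pvStripNoop (cs : List Char)
    (h1 : ∀ c ∈ cs.head?, PySem.Chars.isspace c = false)
    (h2 : ∀ c ∈ cs.getLast?, PySem.Chars.isspace c = false) :
    PySem.Chars.strip cs = cs := by
  unfold PySem.Chars.strip PySem.Chars.lstrip PySem.Chars.rstrip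
  have hl : List.dropWhile PySem.Chars.isspace cs = cs := by
    cases cs with
    | nil => rfl
    | cons c t =>
      have := h1 c (by simp)
      simp [this]
  rw [hl]
  cases hr : cs.reverse with
  | nil => rw [List.reverse_eq_nil_iff.mp hr]; rfl
  | cons c t =>
    have hc : cs.getLast? = some c := by rw [← List.head?_reverse, hr]; rfl
    have hsp := h2 c (by rw [hc]; rfl)
    rw [List.dropWhile_cons]
    simp only [hsp, Bool.false_eq_true, if_false]
    rw [← hr, List.reverse_reverse]

lemma pvStrip_clean (raw : List Char) (h : PySem.Chars.strip raw ≠ []) :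
    pvCleanLine (PySem.Chars.strip raw) := by
  unfold PySem.Chars.strip PySem.Chars.rstrip at *
  set A1 := PySem.Chars.lstrip raw with hA1
  set D := List.dropWhile PySem.Chars.isspace A1.reverse with hD
  refine ⟨h, ?_, ?_⟩
  · -- head of D.reverse: D.reverse is a prefix of A1, whose head is non-space
    have hsuf : D <:+ A1.reverse := List.dropWhile_suffix _
    obtain ⟨u, hu⟩ := hsuf
    have hA1eq : A1 = D.reverse ++ u.reverse := by
      have := congrArg List.reverse hu
      simpa [List.reverse_append] using this.symm
    intro c hcmem
    have hDne : D.reverse ≠ [] := h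
    have hA1h : A1.head? = some c := by
      rw [hA1eq, List.head?_append, Option.or_of_isSome
        (by simpa [List.isSome_head?] using hDne)]
      exact hcmem
    have hA1ne : A1 ≠ [] := by intro e; rw [e] at hA1h; exact (by simp at hA1h)
    have hdw : List.dropWhile PySem.Chars.isspace raw ≠ [] := by
      rw [hA1] at hA1ne; exact hA1ne
    have := List.head_dropWhile_not PySem.Chars.isspace hdw
    have hhead : A1.head hA1ne = c := by
      exact Option.some.inj (by rw [← List.head?_eq_some_head hA1ne]; exact hA1h)
    rw [← hhead]
    exact this
  · -- last of D.reverse = head of D, which dropWhile guarantees non-space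
    intro c hcmem
    have hDne : D ≠ [] := by
      intro e; rw [e] at h; exact h rfl
    have hdh : D.head? = some c := by
      rw [← List.head?_reverse, List.reverse_reverse] at hcmem
      exact hcmem
    have := List.head_dropWhile_not PySem.Chars.isspace (hD ▸ hDne)
    have hhead : D.head hDne = c := Option.some.inj (by rw [← List.head?_eq_some_head hDne]; exact hdh)
    rw [← hhead]
    exact this

-- join '\n' over groups separated by one empty line = join '\n\n' over the joined groups
lemma pvJoinInter (qss : List (List (List Char))) (hg : ∀ g ∈ qss, g ≠ []) :
    PySem.Chars.join ['\n'] (List.intercalate [[]] qss)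
      = PySem.Chars.join ['\n', '\n'] (qss.map (PySem.Chars.join ['\n'])) := by
  induction qss with
  | nil => rfl
  | cons g rest ih =>
    cases rest with
    | nil => rw [pvInterSingleton]; simp only [List.map_cons, List.map_nil, pvJoinEq, pvInterSingleton]
    | cons b u =>
      have hiNe : List.intercalate [[]] (b :: u) ≠ [] :=
        pvInter_ne_nil (b :: u) (by simp) (fun g' hg' => hg g' (List.mem_cons_of_mem _ hg'))
      rw [pvInterCons [[]] g (b :: u) (by simp)]
      simp only [pvJoinEq] at ih ⊢
      rw [List.append_assoc, pvInterAppend ['\n'] g ([[]] ++ List.intercalate [[]] (b :: u))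
            (hg g (by simp)) (by simp), List.singleton_append,
          pvInterCons ['\n'] [] (List.intercalate [[]] (b :: u)) hiNe,
          ih (fun g' hg' => hg g' (List.mem_cons_of_mem _ hg')),
          ]
      simp only [List.map_cons]
      rw [pvInterCons ['\n', '\n'] (PySem.Chars.join ['\n'] g)
            (PySem.Chars.join ['\n'] b :: List.map (PySem.Chars.join ['\n']) u) (by simp)]
      simp [List.append_assoc, pvJoinEq]

lemma pvAcc_eq_intercalate (pss : List (List (List Char))) (cur : List (List Char)) :
    pvAcc pss cur = List.intercalate [[]] (pss ++ [cur]) := by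
  induction pss with
  | nil => rw [pvAcc, List.flatMap_nil, List.nil_append, List.nil_append, pvInterSingleton]
  | cons g pss ih =>
    simp only [pvAcc, List.flatMap_cons] at ih ⊢
    rw [List.cons_append, pvInterCons [[]] g (pss ++ [cur]) (by simp), ← ih]
    simp [List.append_assoc]

lemma pvAcc_nil_eq (pss : List (List (List Char))) (h : pss ≠ []) :
    pvAcc pss [] = List.intercalate [[]] pss ++ [[]] := by
  induction pss with
  | nil => exact absurd rfl h
  | cons g pss ih =>
    cases pss with
    | nil => simp [pvAcc, pvInterSingleton]
    | cons b t =>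
      have ih' := ih (by simp)
      simp only [pvAcc, List.flatMap_cons, List.append_nil] at ih' ⊢
      rw [pvInterCons [[]] g (b :: t) (by simp), ih']
      simp [List.append_assoc]

lemma pvPopTrail_noop (xs : List (List Char)) (h : xs.getLast? ≠ some []) :
    pvPopTrail xs = xs := by
  rw [pvPopTrail]; simp [h]

lemma pvPopTrail_concat_nil (xs : List (List Char)) :
    pvPopTrail (xs ++ [[]]) = pvPopTrail xs := by
  rw [pvPopTrail]; simp

-- the last entry of A's accumulator, in each of the three shapes of the related state
lemma pvAcc_getLast?_of_cur (pss : List (List (List Char))) (cur : List (List Char))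
    (hc : cur ≠ []) : (pvAcc pss cur).getLast? = cur.getLast? := by
  rw [pvAcc, List.getLast?_append, Option.or_of_isSome (List.getLast?_isSome.mpr hc)]

-- the main loop invariant: from related states, the two folds stay related
lemma pvMain (ls : List (List Char)) (pss : List (List (List Char))) (cur : List (List Char))
    (h : pvGood pss cur) :
    ∃ pss' cur', pvGood pss' cur' ∧
      ls.foldl pvStepA (pvAcc pss cur) = pvAcc pss' cur' ∧
      ls.foldl pvStepB (pss.map (PySem.Chars.join ['\n']), cur)
        = (pss'.map (PySem.Chars.join ['\n']), cur') := by
  induction ls generalizing pss cur with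
  | nil => exact ⟨pss, cur, h, rfl, rfl⟩
  | cons raw ls ih =>
    rw [List.foldl_cons, List.foldl_cons]
    by_cases hs : PySem.Chars.strip raw = []
    · by_cases hc : cur = []
      · subst hc
        have eA : pvStepA (pvAcc pss []) raw = pvAcc pss [] := by
          unfold pvStepA
          simp only [hs, ne_eq, not_true_eq_false, if_false]
          by_cases hp : pss = []
          · subst hp; rfl
          · rw [pvAcc_nil_eq pss hp, List.getLast?_concat]
            simp
        have eB : pvStepB (pss.map (PySem.Chars.join ['\n']), []) raw
            = (pss.map (PySem.Chars.join ['\n']), []) := by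
          unfold pvStepB; simp [hs]
        rw [eA, eB]; exact ih pss [] h
      · -- an empty line closes the non-empty current paragraph
        have hlast : ∃ l, cur.getLast? = some l ∧ l ≠ [] := by
          cases hcl : cur.getLast? with
          | none => exact absurd (List.getLast?_eq_none_iff.mp hcl) hc
          | some l => exact ⟨l, rfl, (h.2 l (List.mem_of_getLast? hcl)).1⟩
        obtain ⟨l, hcl, hlne⟩ := hlast
        have eA : pvStepA (pvAcc pss cur) raw = pvAcc (pss ++ [cur]) [] := by
          unfold pvStepA
          simp only [hs, ne_eq, not_true_eq_false, if_false]
          rw [pvAcc_getLast?_of_cur pss cur hc, hcl]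
          simp only [hlne, not_false_eq_true, if_true]
          rw [pvAcc, pvAcc, List.flatMap_append, List.flatMap_cons, List.flatMap_nil]
          simp [List.append_assoc]
        have eB : pvStepB (pss.map (PySem.Chars.join ['\n']), cur) raw
            = ((pss ++ [cur]).map (PySem.Chars.join ['\n']), []) := by
          unfold pvStepB; simp [hs, hc]
        rw [eA, eB]
        exact ih (pss ++ [cur]) []
          ⟨fun g hg' => by
              rcases List.mem_append.mp hg' with h' | h'
              · exact h.1 g h'
              · simp only [List.mem_singleton] at h'; exact h' ▸ ⟨hc, h.2⟩,
            fun l hl => by simp at hl⟩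
    · -- a non-empty line extends the current paragraph
      have eA : pvStepA (pvAcc pss cur) raw = pvAcc pss (cur ++ [PySem.Chars.strip raw]) := by
        unfold pvStepA
        simp only [hs, ne_eq, not_false_eq_true, if_true]
        rw [pvAcc, pvAcc, List.append_assoc]
      have eB : pvStepB (pss.map (PySem.Chars.join ['\n']), cur) raw
          = (pss.map (PySem.Chars.join ['\n']), cur ++ [PySem.Chars.strip raw]) := by
        unfold pvStepB; simp [hs]
      rw [eA, eB]
      exact ih pss (cur ++ [PySem.Chars.strip raw])
        ⟨h.1, fun l hl => by
          rcases List.mem_append.mp hl with h' | h'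
          · exact h.2 l h'
          · simp only [List.mem_singleton] at h'; exact h' ▸ pvStrip_clean raw hs⟩

lemma pvFinal (qss : List (List (List Char)))
    (hg : ∀ g ∈ qss, g ≠ [] ∧ ∀ l ∈ g, pvCleanLine l) :
    PySem.Chars.strip (PySem.Chars.join ['\n'] (List.intercalate [[]] qss))
      = PySem.Chars.join ['\n', '\n'] (qss.map (PySem.Chars.join ['\n'])) := by
  rw [pvJoinInter qss (fun g h => (hg g h).1)]
  apply pvStripNoop
  · -- the first character is the first character of the first clean line
    cases qss with
    | nil => intro c hc; simp [pvJoinEq, List.intercalate, List.intersperse] at hc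
    | cons g0 rest =>
      obtain ⟨hg0ne, hg0cl⟩ := hg g0 (by simp)
      obtain ⟨l, g', rfl⟩ : ∃ l g', g0 = l :: g' := by
        cases g0 with
        | nil => exact absurd rfl hg0ne
        | cons a b => exact ⟨a, b, rfl⟩
      · have hlcl : pvCleanLine l := hg0cl l (by simp)
        have hjne : PySem.Chars.join ['\n'] (l :: g') ≠ [] := by
          rw [pvJoinEq]
          intro e
          have := pvInterHead? ['\n'] l g' hlcl.1
          rw [e] at this
          cases hh : l.head? with
          | none => exact hlcl.1 (List.head?_eq_none_iff.mp hh)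
          | some c => rw [hh] at this; simp at this
        intro c hc
        apply hlcl.2.1 c
        rw [List.map_cons, pvJoinEq, pvInterHead? ['\n', '\n'] _ _ hjne] at hc
        rw [pvJoinEq, pvInterHead? ['\n'] l g' hlcl.1] at hc
        exact hc
  · -- the last character is the last character of the last clean line
    rcases List.eq_nil_or_concat qss with rfl | ⟨init, gz, rfl⟩
    · intro c hc; simp [pvJoinEq, List.intercalate, List.intersperse] at hc
    · rw [List.concat_eq_append]
      obtain ⟨hgzne, hgzcl⟩ := hg gz (by simp)
      rcases List.eq_nil_or_concat gz with rfl | ⟨g', lz, hgz⟩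
      · exact absurd rfl hgzne
      · rw [List.concat_eq_append] at hgz
        have hlzcl : pvCleanLine lz := hgzcl lz (by rw [hgz]; simp)
        have hjne : PySem.Chars.join ['\n'] gz ≠ [] := by
          rw [pvJoinEq, hgz]
          intro e
          have := pvInterLast? ['\n'] lz g' hlzcl.1
          rw [e] at this
          cases hh : lz.getLast? with
          | none => exact hlzcl.1 (List.getLast?_eq_none_iff.mp hh)
          | some c => rw [hh] at this; simp at this
        intro c hc
        apply hlzcl.2.2 c
        rw [List.map_append, List.map_singleton, pvJoinEq,
          pvInterLast? ['\n', '\n'] _ _ hjne] at hc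
        rw [pvJoinEq, hgz, pvInterLast? ['\n'] lz g' hlzcl.1] at hc
        exact hc

-- ===== VERDICT (by name: the statement is the Claim_ definition above) =====
theorem final_cleanup_spec : Claim_equal_final_cleanup := by
  intro text _
  unfold Spec_final_cleanup final_cleanup final_cleanup_alt
  obtain ⟨pss, cur, hgood, hA, hB⟩ :=
    pvMain (PySem.Chars.splitOn text.toList ['\n']) [] [] (by constructor <;> simp)
  have hA2 : List.foldl pvStepA [] (PySem.Chars.splitOn text.toList ['\n']) = pvAcc pss cur := hA
  have hB2 : List.foldl pvStepB ([], []) (PySem.Chars.splitOn text.toList ['\n'])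
      = (pss.map (PySem.Chars.join ['\n']), cur) := hB
  rw [hA2, hB2]
  by_cases hc : cur = []
  · subst hc
    simp only [ne_eq, not_true_eq_false, if_false]
    by_cases hp : pss = []
    · subst hp
      show String.mk (PySem.Chars.strip (PySem.Chars.join ['\n'] (pvPopTrail []))) = _
      rw [pvPopTrail]
      simp [PySem.Chars.join_nil, PySem.Chars.strip, PySem.Chars.lstrip, PySem.Chars.rstrip]
    · rw [pvAcc_nil_eq pss hp, pvPopTrail_concat_nil]
      obtain ⟨g, hgmem, l, hlmem, T, hT⟩ :=
        pvInter_concat pss hp (fun g hg' => (hgood.1 g hg').1)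
      have hlgne : (List.intercalate [[]] pss).getLast? ≠ some [] := by
        rw [hT, List.getLast?_concat]
        have := ((hgood.1 g hgmem).2 l hlmem).1
        intro e; exact this (Option.some.inj e)
      rw [pvPopTrail_noop _ hlgne, pvFinal pss hgood.1]
  · simp only [ne_eq, hc, not_false_eq_true, if_true]
    rw [pvAcc_eq_intercalate pss cur]
    have hgq : ∀ g ∈ pss ++ [cur], g ≠ [] ∧ ∀ l ∈ g, pvCleanLine l := by
      intro g hg'
      rcases List.mem_append.mp hg' with h | h
      · exact hgood.1 g h
      · simp only [List.mem_singleton] at h; subst h; exact ⟨hc, hgood.2⟩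
    obtain ⟨g, hgmem, l, hlmem, T, hT⟩ :=
      pvInter_concat (pss ++ [cur]) (by simp) (fun g hg' => (hgq g hg').1)
    have hlgne : (List.intercalate [[]] (pss ++ [cur])).getLast? ≠ some [] := by
      rw [hT, List.getLast?_concat]
      have := ((hgq g hgmem).2 l hlmem).1
      intro e; exact this (Option.some.inj e)
    rw [pvPopTrail_noop _ hlgne, pvFinal (pss ++ [cur]) hgq]
    simp
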